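-- pv_equiv track=rewrite | github.com/shuzeyfa/leetcode | B_Increasing_Sequence.py | find
-- ===== SOURCE A (Python) =====
-- def find(s,a):
--     if len(s)==1 and s==a:
--         return 0
--     if len(s)==1:
--         return 1
--
--     s2 = s[:len(s)//2]
--     s3 = s[len(s)//2:]
--
--     ind= ord(a)-ord("a")
--     ind += 1
--     ind = ind%26
--     ind += ord("a")
--     c = chr(ind)
--     temp4 = s2.count(c)
--     temp5 = s3.count(c)
--     temp = s2.count(a) + temp5
--     temp2 = s3.count(a) + temp4
--     if temp>=temp2:
--         ind= ord(a)-ord("a")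
--         ind += 1
--         ind = ind%26
--         ind += ord("a")
--         c = chr(ind)
--         return len(s2)-s2.count(a) + find(s3,c)
--     else:
--         ind= ord(a)-ord("a")
--         ind += 1
--         ind = ind%26
--         ind += ord("a")
--         c = chr(ind)
--         return len(s3)-s3.count(a) + find(s2,c)
-- ===== SOURCE B (Python) =====
-- def find(s, a):
--     total = 0
--     while len(s) > 1:
--         half = len(s) // 2
--         s2, s3 = s[:half], s[half:]
--         c = chr((ord(a) - ord("a") + 1) % 26 + ord("a"))
--         if s2.count(a) + s3.count(c) >= s3.count(a) + s2.count(c):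
--             total += len(s2) - s2.count(a)
--             s, a = s3, c
--         else:
--             total += len(s3) - s3.count(a)
--             s, a = s2, c
--     return total + (0 if s == a else 1)
-- ===== Notes on version B (the rewrite author's own statement) =====
-- stated objective: simpler
-- what changed: Replaced the single-path recursion (which recomputes the successor character three times per level) by an iterative while-loop with a running accumulator, computing the successor character once per level.
import Mathlib
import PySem

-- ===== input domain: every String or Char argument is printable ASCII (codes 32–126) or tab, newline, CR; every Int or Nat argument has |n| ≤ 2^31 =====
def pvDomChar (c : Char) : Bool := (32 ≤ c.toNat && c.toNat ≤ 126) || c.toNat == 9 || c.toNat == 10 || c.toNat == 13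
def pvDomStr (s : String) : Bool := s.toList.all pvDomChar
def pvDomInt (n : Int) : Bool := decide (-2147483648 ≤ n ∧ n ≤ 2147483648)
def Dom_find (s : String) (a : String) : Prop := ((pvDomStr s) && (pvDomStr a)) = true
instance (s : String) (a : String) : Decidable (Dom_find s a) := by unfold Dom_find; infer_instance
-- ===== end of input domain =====

-- B replaces A's single-path recursion by an iterative accumulator loop (objective: simpler);
-- return-value equivalence only (neither program mutates its arguments).

-- ===== PORT A =====
-- ord(a): exact when a has exactly one character (guaranteed by Pre_ wherever A evaluates it)
def pvOrd (a : List Char) : Int :=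
  match a with
  | [c] => (c.toNat : Int)
  | _ => 0

-- chr(i): exact here — every argument passed lies in 97..122
def pvChr (i : Int) : Char := Char.ofNat i.toNat

-- A's recursion, fuel-guarded (fuel = len(s)+1 always suffices for s ≠ "": each level
-- strictly shrinks s; the 0 case is never reached inside Pre_).
def findRec : Nat → List Char → List Char → Int
  | 0, _, _ => 0
  | Nat.succ f, s, a =>
    if s.length = 1 ∧ s = a then 0
    else if s.length = 1 then 1
    else
      let s2 := PySem.List.slice s none (some (PySem.Int.floordiv (s.length : Int) 2))
      let s3 := PySem.List.slice s (some (PySem.Int.floordiv (s.length : Int) 2)) none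
      let ind := pvOrd a - 97
      let ind := ind + 1
      let ind := PySem.Int.mod ind 26
      let ind := ind + 97
      let c := pvChr ind
      let temp4 := (PySem.Chars.count s2 [c] : Int)
      let temp5 := (PySem.Chars.count s3 [c] : Int)
      let temp := (PySem.Chars.count s2 a : Int) + temp5
      let temp2 := (PySem.Chars.count s3 a : Int) + temp4
      if temp ≥ temp2 then
        (s2.length : Int) - (PySem.Chars.count s2 a : Int) + findRec f s3 [c]
      else
        (s3.length : Int) - (PySem.Chars.count s3 a : Int) + findRec f s2 [c]

def find (s : String) (a : String) : Int :=
  findRec (s.toList.length + 1) s.toList a.toList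

-- ===== PORT B =====
-- Source B's while-loop with accumulator `total`, fuel-guarded the same way.
def findLoop : Nat → List Char → List Char → Int → Int
  | 0, _, _, total => total
  | Nat.succ f, s, a, total =>
    if s.length > 1 then
      let half := PySem.Int.floordiv (s.length : Int) 2
      let s2 := PySem.List.slice s none (some half)
      let s3 := PySem.List.slice s (some half) none
      let c := pvChr (PySem.Int.mod (pvOrd a - 97 + 1) 26 + 97)
      if (PySem.Chars.count s2 a : Int) + (PySem.Chars.count s3 [c] : Int)
          ≥ (PySem.Chars.count s3 a : Int) + (PySem.Chars.count s2 [c] : Int) then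
        findLoop f s3 [c] (total + ((s2.length : Int) - (PySem.Chars.count s2 a : Int)))
      else
        findLoop f s2 [c] (total + ((s3.length : Int) - (PySem.Chars.count s3 a : Int)))
    else total + (if s = a then 0 else 1)

def find_alt (s : String) (a : String) : Int :=
  findLoop (s.toList.length + 1) s.toList a.toList 0

-- ===== PRECONDITION & SPEC =====
-- Pre_ admits exactly the inputs on which A returns: s non-empty (on s == "" A recurses forever
-- and raises RecursionError), and either len(s) == 1 (A returns 1 before touching a) or
-- len(a) == 1 (otherwise ord(a) raises TypeError).
def Pre_find (s : String) (a : String) : Prop :=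
  PySem.Str.len s = 1 ∨ (1 ≤ PySem.Str.len s ∧ PySem.Str.len a = 1)
instance (s : String) (a : String) : Decidable (Pre_find s a) := by unfold Pre_find; infer_instance

def pvWitness_find : String × String := ("banana", "a")

def Spec_find (s : String) (a : String) (out : Int) : Prop := out = find_alt s a
instance (s : String) (a : String) (out : Int) : Decidable (Spec_find s a out) := by unfold Spec_find; infer_instance

-- ===== CLAIM (what is proved, stated in full; the proofs are below) =====
def Claim_equal_find : Prop := ∀ (s : String) (a : String), Dom_find s a → Pre_find s a → Spec_find s a (find s a)

-- ===== LEMMAS AND PROOFS =====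

-- The loop with accumulator computes `total +` A's recursion, level by level (same fuel).
theorem findLoop_eq_findRec (f : Nat) : ∀ (s a : List Char) (total : Int),
    1 ≤ s.length → findLoop f s a total = total + findRec f s a := by
  induction f with
  | zero => intro s a total _; simp [findLoop, findRec]
  | succ f ih =>
    intro s a total hs
    by_cases h1 : s.length = 1
    · rw [findLoop, findRec, if_neg (show ¬ s.length > 1 by omega)]
      by_cases hsa : s = a
      · rw [if_pos (show s.length = 1 ∧ s = a from ⟨h1, hsa⟩), if_pos hsa]
      · rw [if_neg (show ¬(s.length = 1 ∧ s = a) from fun h => hsa h.2), if_pos h1, if_neg hsa]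
    · have h2 : 2 ≤ s.length := by omega
      have hgt : s.length > 1 := by omega
      have hfd : PySem.Int.floordiv (s.length : Int) 2 = ((s.length / 2 : Nat) : Int) := by
        exact_mod_cast PySem.Int.floordiv_natCast s.length 2
      have hA1 : ¬(s.length = 1 ∧ s = a) := fun h => h1 h.1
      rw [findLoop, findRec, if_pos hgt, if_neg hA1, if_neg h1]
      simp only [hfd, PySem.List.slice_to_natCast, PySem.List.slice_from_natCast]
      have hl2 : 1 ≤ (s.take (s.length / 2)).length := by
        simp [List.length_take]; omega
      have hl3 : 1 ≤ (s.drop (s.length / 2)).length := by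
        simp [List.length_drop]; omega
      by_cases hc : (PySem.Chars.count (s.take (s.length / 2)) a : Int)
            + (PySem.Chars.count (s.drop (s.length / 2)) [pvChr (PySem.Int.mod (pvOrd a - 97 + 1) 26 + 97)] : Int)
          ≥ (PySem.Chars.count (s.drop (s.length / 2)) a : Int)
            + (PySem.Chars.count (s.take (s.length / 2)) [pvChr (PySem.Int.mod (pvOrd a - 97 + 1) 26 + 97)] : Int)
      · rw [if_pos hc, if_pos hc, ih _ _ _ hl3]; ring
      · rw [if_neg hc, if_neg hc, ih _ _ _ hl2]; ring

-- ===== VERDICT (by name: the statement is the Claim_ definition above) =====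
theorem find_spec : Claim_equal_find := by
  unfold Claim_equal_find
  intro s a _ hpre
  unfold Spec_find find find_alt
  have hs : 1 ≤ s.toList.length := by
    unfold Pre_find at hpre
    simp only [PySem.Str.len_eq] at hpre
    rcases hpre with h | ⟨h, _⟩ <;> omega
  rw [findLoop_eq_findRec _ _ _ _ hs, zero_add]
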